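-- pv_equiv track=rewrite | github.com/TomerGat/FinCloud | web_app/Fincloud_util_functions.py | organize_comp_name
-- ===== SOURCE A (Python) =====
-- def divide_to_words(words):
--     wordList = []
--     temp_str = ''
--     for ch in words:
--         if ch != ' ':
--             temp_str += ch
--         else:
--             if temp_str != '':
--                 wordList.append(temp_str)
--             temp_str = ''
--     if temp_str != '':
--         wordList.append(temp_str)
--     return wordList
--
-- def organize_comp_name(comp_name):
--     words = divide_to_words(comp_name)
--     new_name = ''
--     for i in range(len(words)):
--         new_name += words[i]
--         if i != len(words)-1:
--             new_name += " "
--     return new_name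
-- ===== SOURCE B (Python) =====
-- def organize_comp_name(comp_name):
--     res = []
--     pending = False
--     for ch in comp_name:
--         if ch == ' ':
--             pending = True
--         else:
--             if res and pending:
--                 res.append(' ')
--             res.append(ch)
--             pending = False
--     return ''.join(res)
-- ===== Notes on version B (the rewrite author's own statement) =====
-- stated objective: simpler
-- what changed: Single pass with a pending-space flag over one list accumulator replaces A's two phases (building an intermediate word list, then re-joining it with an index loop and a last-index test).
import Mathlib
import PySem

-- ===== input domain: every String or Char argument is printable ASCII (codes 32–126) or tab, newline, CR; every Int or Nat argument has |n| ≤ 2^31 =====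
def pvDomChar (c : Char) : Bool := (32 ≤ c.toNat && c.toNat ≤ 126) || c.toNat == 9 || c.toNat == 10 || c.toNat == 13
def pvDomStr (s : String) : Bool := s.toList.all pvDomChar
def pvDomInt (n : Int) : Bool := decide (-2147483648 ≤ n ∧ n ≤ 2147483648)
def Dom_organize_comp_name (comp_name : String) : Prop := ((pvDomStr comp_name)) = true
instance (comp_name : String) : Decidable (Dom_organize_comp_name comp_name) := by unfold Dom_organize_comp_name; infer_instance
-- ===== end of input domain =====

-- B fuses A's two phases (word-list build, then index-loop rejoin) into one simpler pass with a pending-space flag over a list accumulator.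

-- ===== PORT A =====
-- divide_to_words: the character loop, state (wordList, temp_str)
def pvDivideStep (st : List (List Char) × List Char) (ch : Char) : List (List Char) × List Char :=
  if ch ≠ ' ' then (st.1, st.2 ++ [ch])
  else if st.2 ≠ [] then (st.1 ++ [st.2], []) else (st.1, [])

def divide_to_words (cs : List Char) : List (List Char) :=
  let st := cs.foldl pvDivideStep ([], [])
  if st.2 ≠ [] then st.1 ++ [st.2] else st.1

-- A's join loop: for i in range(len(words)): new_name += words[i]; if i != len(words)-1: new_name += " "
def pvJoinStep (words : List (List Char)) (acc : List Char) (i : Nat) : List Char :=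
  let acc := acc ++ words.getD i []
  if i ≠ words.length - 1 then acc ++ [' '] else acc

def organize_comp_name (comp_name : String) : String :=
  let words := divide_to_words comp_name.toList
  String.ofList ((List.range words.length).foldl (pvJoinStep words) [])

-- ===== PORT B =====
-- single pass, state (res, pending)
def pvNormStep (st : List Char × Bool) (ch : Char) : List Char × Bool :=
  if ch = ' ' then (st.1, true)
  else if st.1 ≠ [] ∧ st.2 = true then (st.1 ++ [' ', ch], false)
  else (st.1 ++ [ch], false)

def organize_comp_name_alt (comp_name : String) : String :=
  String.ofList (comp_name.toList.foldl pvNormStep ([], false)).1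

-- ===== PRECONDITION & SPEC =====
def Spec_organize_comp_name (comp_name : String) (out : String) : Prop := out = organize_comp_name_alt comp_name
instance (comp_name : String) (out : String) : Decidable (Spec_organize_comp_name comp_name out) := by unfold Spec_organize_comp_name; infer_instance

-- ===== CLAIM (what is proved, stated in full; the proofs are below) =====
def Claim_equal_organize_comp_name : Prop := ∀ (comp_name : String), Dom_organize_comp_name comp_name → Spec_organize_comp_name comp_name (organize_comp_name comp_name)

-- ===== LEMMAS AND PROOFS =====

-- the single-space join of a word list, recursively (proof-side characterisation of A's join loop)
def pvJ : List (List Char) → List Char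
  | [] => []
  | [w] => w
  | w :: v :: ws => w ++ ' ' :: pvJ (v :: ws)

lemma pvJ_append (ws : List (List Char)) (w : List Char) :
    pvJ (ws ++ [w]) = pvJ ws ++ (if ws = [] then w else ' ' :: w) := by
  match ws with
  | [] => simp [pvJ]
  | [x] => simp [pvJ]
  | x :: y :: ys =>
    have ih := pvJ_append (y :: ys) w
    simp only [List.cons_append, pvJ] at ih ⊢
    rw [ih]
    simp

lemma pvJ_ne_nil (ws : List (List Char)) (h : ∀ w ∈ ws, w ≠ []) (hne : ws ≠ []) :
    pvJ ws ≠ [] := by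
  match ws with
  | [] => exact absurd rfl hne
  | [w] => simpa [pvJ] using h w (by simp)
  | w :: v :: ws => simp [pvJ]

-- A's join loop computes pvJ
lemma joinLoop_eq_aux (W : List (List Char)) (n j : Nat) (hj : W.length - j = n) (acc : List Char) :
    (List.range' j n).foldl (pvJoinStep W) acc = acc ++ pvJ (W.drop j) := by
  induction n generalizing j acc with
  | zero =>
    have : W.drop j = [] := List.drop_eq_nil_of_le (by omega)
    simp [this, pvJ]
  | succ n ih =>
    have hjlt : j < W.length := by omega
    rw [List.range'_succ, List.foldl_cons, ih (j + 1) (by omega)]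
    have hdrop : W.drop j = W[j] :: W.drop (j + 1) := List.drop_eq_getElem_cons hjlt
    by_cases hlast : j = W.length - 1
    · have hnil : W.drop (j + 1) = [] := List.drop_eq_nil_of_le (by omega)
      subst hlast
      rw [hdrop, hnil]
      simp [pvJoinStep, pvJ, List.getD_eq_getElem?_getD, List.getElem?_eq_getElem hjlt]
    · have hne : W.drop (j + 1) ≠ [] := by
        simp only [ne_eq, List.drop_eq_nil_iff]; omega
      obtain ⟨v, vs, hvs⟩ := List.exists_cons_of_ne_nil hne
      rw [hdrop, hvs]
      simp [pvJoinStep, pvJ, hlast, List.getD_eq_getElem?_getD, hjlt]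

lemma joinLoop_eq (W : List (List Char)) :
    (List.range W.length).foldl (pvJoinStep W) [] = pvJ W := by
  have := joinLoop_eq_aux W W.length 0 (by omega) []
  simpa [List.range_eq_range'] using this

-- the invariant linking A's fold state (wordList, temp_str) with B's fold state (res, pending)
def pvInv (wl : List (List Char)) (tmp : List Char) (res : List Char) (pending : Bool) : Prop :=
  (∀ w ∈ wl, w ≠ []) ∧
  (if tmp = [] then res = pvJ wl ∧ (wl ≠ [] → pending = true)
   else res = pvJ (wl ++ [tmp]) ∧ pending = false)

lemma pvInv_step (ch : Char) (wl : List (List Char)) (tmp res : List Char) (pending : Bool)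
    (h : pvInv wl tmp res pending) :
    pvInv (pvDivideStep (wl, tmp) ch).1 (pvDivideStep (wl, tmp) ch).2
          (pvNormStep (res, pending) ch).1 (pvNormStep (res, pending) ch).2 := by
  obtain ⟨hwl, hst⟩ := h
  by_cases hch : ch = ' '
  · subst hch
    by_cases htmp : tmp = []
    · subst htmp
      rw [if_pos rfl] at hst
      refine ⟨by simpa [pvDivideStep] using hwl, ?_⟩
      simp [pvDivideStep, pvNormStep, hst.1]
    · rw [if_neg htmp] at hst
      constructor
      · intro w hw
        simp [pvDivideStep, htmp] at hw
        rcases hw with h' | h'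
        · exact hwl w h'
        · rw [h']; exact htmp
      · simp [pvDivideStep, pvNormStep, htmp, hst.1]
  · by_cases htmp : tmp = []
    · subst htmp
      rw [if_pos rfl] at hst
      by_cases hwlnil : wl = []
      · subst hwlnil
        have hres : res = [] := by simpa [pvJ] using hst.1
        subst hres
        simp [pvDivideStep, pvNormStep, hch, pvInv, pvJ]
      · have hpend : pending = true := hst.2 hwlnil
        have hJne := pvJ_ne_nil wl hwl hwlnil
        subst hpend
        refine ⟨by simpa [pvDivideStep, hch] using hwl, ?_⟩
        rw [hst.1]
        simp [pvDivideStep, pvNormStep, hch, hJne, pvJ_append, hwlnil]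
    · rw [if_neg htmp] at hst
      obtain ⟨hres, hpend⟩ := hst
      subst hpend
      refine ⟨by simpa [pvDivideStep, hch] using hwl, ?_⟩
      have h1 : tmp ++ [ch] ≠ [] := by simp
      by_cases hwlnil : wl = [] <;>
        simp [pvDivideStep, pvNormStep, pvJ, hch, h1, hres, pvJ_append, hwlnil]

lemma pvInv_fold (cs : List Char) :
    ∀ wl tmp res pending, pvInv wl tmp res pending →
    pvInv (cs.foldl pvDivideStep (wl, tmp)).1 (cs.foldl pvDivideStep (wl, tmp)).2
          (cs.foldl pvNormStep (res, pending)).1 (cs.foldl pvNormStep (res, pending)).2 := by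
  induction cs with
  | nil => intro wl tmp res pending h; exact h
  | cons c cs ih =>
    intro wl tmp res pending h
    have step := pvInv_step c wl tmp res pending h
    have := ih (pvDivideStep (wl, tmp) c).1 (pvDivideStep (wl, tmp) c).2
              (pvNormStep (res, pending) c).1 (pvNormStep (res, pending) c).2 step
    simpa using this

-- ===== VERDICT (by name: the statement is the Claim_ definition above) =====
theorem organize_comp_name_spec : Claim_equal_organize_comp_name := by
  intro s _
  unfold Spec_organize_comp_name organize_comp_name organize_comp_name_alt divide_to_words
  obtain ⟨hne, hst⟩ := pvInv_fold s.toList [] [] [] false ⟨by simp, by simp [pvJ]⟩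
  by_cases htmp : (s.toList.foldl pvDivideStep ([], [])).2 = []
  · rw [if_pos htmp] at hst
    simp [htmp, joinLoop_eq, hst.1]
  · rw [if_neg htmp] at hst
    have hJ := joinLoop_eq ((s.toList.foldl pvDivideStep ([], [])).1 ++ [(s.toList.foldl pvDivideStep ([], [])).2])
    simp only [List.length_append, List.length_cons, List.length_nil, Nat.zero_add] at hJ
    simp [htmp, hst.1, hJ]
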